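-- pv_equiv track=rewrite | github.com/TALHY50/Quicksorting | Q1-Iterative&Recursive.py | chocolates_iteratively
-- ===== SOURCE A (Python) =====
-- def chocolates_iteratively(chocolates, students):
--     distribution = {}
--     for student in students:
--         if chocolates:
--             distribution[student] = chocolates.pop(0)
--         else:
--             distribution[student] = None
--     return distribution
-- ===== SOURCE B (Python) =====
-- def chocolates_iteratively(chocolates, students):
--     n = len(students)
--     pairs = list(zip(students, chocolates))
--     pairs += [(s, None) for s in students[len(chocolates):]]
--     result = dict(pairs)
--     del chocolates[:n]
--     return result
-- ===== Notes on version B (the rewrite author's own statement) =====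
-- stated objective: simpler
-- what changed: Replaces the per-student branch with pop(0) (quadratic front-popping) by one positional zip pairing plus a None-fill tail slice, building the dict in one step and reproducing the mutation with a single bulk slice deletion.
import Mathlib
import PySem

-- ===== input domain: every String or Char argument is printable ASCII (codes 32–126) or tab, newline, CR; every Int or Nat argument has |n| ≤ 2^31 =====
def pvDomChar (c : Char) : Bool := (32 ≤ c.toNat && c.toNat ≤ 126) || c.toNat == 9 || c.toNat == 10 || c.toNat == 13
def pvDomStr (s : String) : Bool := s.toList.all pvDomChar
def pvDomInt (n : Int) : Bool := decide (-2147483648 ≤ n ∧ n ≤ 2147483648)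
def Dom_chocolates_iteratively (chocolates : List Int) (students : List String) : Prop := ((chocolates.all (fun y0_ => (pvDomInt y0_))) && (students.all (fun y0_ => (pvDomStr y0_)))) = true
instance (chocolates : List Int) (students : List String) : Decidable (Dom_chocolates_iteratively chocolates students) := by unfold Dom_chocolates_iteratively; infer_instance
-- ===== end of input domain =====

-- B builds the dict in one step from a zip pairing plus a None-fill tail, instead of A's
-- per-student branch with pop(0); in Python both also truncate `chocolates` in place the same way
-- (the theorems here are about the return value only).


-- ===== PORT A =====
-- the for-loop over students, carrying the dict and the remaining chocolates (pop(0) = take the head)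
def chocIterGo : List Int → List String → PySem.Dict String (Option Int) → PySem.Dict String (Option Int)
  | _, [], d => d
  | [], s :: rest, d => chocIterGo [] rest (d.insert s none)
  | c :: cs, s :: rest, d => chocIterGo cs rest (d.insert s (some c))

def chocolates_iteratively (chocolates : List Int) (students : List String) : List (String × Option Int) :=
  (chocIterGo chocolates students PySem.Dict.empty).items

-- ===== PORT B =====
def chocolates_iteratively_alt (chocolates : List Int) (students : List String) : List (String × Option Int) :=
  let pairs := ((students.zip chocolates).map (fun p => (p.1, some p.2)))
      ++ ((PySem.List.slice students (some (chocolates.length : Int)) none).map (fun s => (s, (none : Option Int))))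
  (PySem.Dict.ofList pairs).items

-- ===== PRECONDITION & SPEC =====
def Spec_chocolates_iteratively (chocolates : List Int) (students : List String) (out : List (String × Option Int)) : Prop := out = chocolates_iteratively_alt chocolates students
instance (chocolates : List Int) (students : List String) (out : List (String × Option Int)) : Decidable (Spec_chocolates_iteratively chocolates students out) := by unfold Spec_chocolates_iteratively; infer_instance

-- ===== CLAIM (what is proved, stated in full; the proofs are below) =====
def Claim_equal_chocolates_iteratively : Prop := ∀ (chocolates : List Int) (students : List String), Dom_chocolates_iteratively chocolates students → Spec_chocolates_iteratively chocolates students (chocolates_iteratively chocolates students)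

-- ===== LEMMAS AND PROOFS =====

-- the pair sequence B feeds to dict(...)
def chocPairs (chocolates : List Int) (students : List String) : List (String × Option Int) :=
  ((students.zip chocolates).map (fun p => (p.1, some p.2)))
    ++ ((students.drop chocolates.length).map (fun s => (s, (none : Option Int))))

lemma chocIterGo_eq_foldl (students : List String) :
    ∀ (chocolates : List Int) (d : PySem.Dict String (Option Int)),
      chocIterGo chocolates students d
        = (chocPairs chocolates students).foldl (fun d p => d.insert p.1 p.2) d := by
  induction students with
  | nil =>
      intro choc d
      cases choc <;> simp [chocIterGo, chocPairs]
  | cons s rest ih =>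
      intro choc d
      cases choc with
      | nil => simp [chocIterGo, chocPairs, ih]
      | cons c cs => simp [chocIterGo, chocPairs, ih]

-- ===== VERDICT (by name: the statement is the Claim_ definition above) =====
theorem chocolates_iteratively_spec : Claim_equal_chocolates_iteratively := by
  intro chocolates students _
  unfold Spec_chocolates_iteratively chocolates_iteratively chocolates_iteratively_alt
  rw [chocIterGo_eq_foldl]
  simp [PySem.Dict.ofList, PySem.Dict.update, chocPairs, PySem.List.slice_from_natCast, List.foldl_append]
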